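-- pv_equiv track=rewrite | github.com/DongGyu123/practice | 자료구조/Dict/homework.py | maxDiffIndex
-- ===== SOURCE A (Python) =====
-- def maxDiffIndex(arr, n):
--
--   """
--   >>> maxDiffIndex([2, 1, 3, 4, 2, 1, 5, 1, 7],9)
--   6
--   >>> maxDiffIndex([2, 2, 2],3)
--   2
--   >>> maxDiffIndex([1,2,3,4,5],5)
--   0
--   >>> maxDiffIndex([-1,2,-3,4,-5,1,1,-3],8)
--   5
--   >>> maxDiffIndex([1],1)
--   0
--   >>> maxDiffIndex([1,-1,1,-1,1,-1,1],7)
--   6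
--   """
--   number_data={}
--   distance = {}
--   for k in range(n) :
--     if arr[k] not in number_data.keys() :
--       number_data[arr[k]] = k
--       distance[arr[k]]=0
--     else :
--       distance[arr[k]] = k - number_data[arr[k]]
--
--   return max(distance.values())
-- ===== SOURCE B (Python) =====
-- def maxDiffIndex(arr, n):
--     first = {}
--     for k in range(n):
--         first.setdefault(arr[k], k)
--     last = {}
--     for k in range(n):
--         last[arr[k]] = k
--     return max(last[v] - first[v] for v in first)
-- ===== Notes on version B (the rewrite author's own statement) =====
-- stated objective: alternative
-- what changed: Replaces A's single loop with an inline running-distance dict by two separate index-table passes (first-occurrence via setdefault, last-occurrence via overwrite) followed by a final max-reduction over last[v]-first[v].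
import Mathlib
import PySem

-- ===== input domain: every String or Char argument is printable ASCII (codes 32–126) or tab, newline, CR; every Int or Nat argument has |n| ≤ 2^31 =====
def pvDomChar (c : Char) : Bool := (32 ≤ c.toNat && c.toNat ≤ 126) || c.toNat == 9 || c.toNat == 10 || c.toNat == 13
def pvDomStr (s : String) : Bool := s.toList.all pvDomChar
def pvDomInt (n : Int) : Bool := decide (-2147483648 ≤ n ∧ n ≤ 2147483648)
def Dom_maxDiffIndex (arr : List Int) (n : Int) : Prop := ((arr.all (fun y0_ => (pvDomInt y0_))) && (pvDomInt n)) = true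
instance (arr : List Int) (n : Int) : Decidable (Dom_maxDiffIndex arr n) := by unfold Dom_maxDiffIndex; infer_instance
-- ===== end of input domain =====

-- B replaces A's single loop holding a running-distance dict by two index-table
-- passes (first occurrence via setdefault, last occurrence via overwrite) plus a
-- final max-reduction; same cost, different decomposition.

-- ===== PORT A =====
-- one loop body: x = arr[k]; if x unseen, record first index and distance 0,
-- else distance[x] = k - first_index[x]
def pvStepA (arr : List Int) (st : PySem.Dict Int Int × PySem.Dict Int Int) (k : Int) :
    PySem.Dict Int Int × PySem.Dict Int Int :=
  let x := PySem.List.pyGetD arr k 0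
  if st.1.contains x = false then (st.1.insert x k, st.2.insert x 0)
  else (st.1, st.2.insert x (k - st.1.getD x 0))

def maxDiffIndex (arr : List Int) (n : Int) : Int :=
  let st := (PySem.List.pyRange 0 n 1).foldl (pvStepA arr) (PySem.Dict.empty, PySem.Dict.empty)
  -- max(distance.values()); none (empty dict) is Python's ValueError, excluded by Pre_
  (PySem.List.max? st.2.values (fun y => y)).getD 0

-- ===== PORT B =====
def maxDiffIndex_alt (arr : List Int) (n : Int) : Int :=
  let first := (PySem.List.pyRange 0 n 1).foldl
    (fun d k => d.setdefault (PySem.List.pyGetD arr k 0) k) PySem.Dict.empty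
  let last := (PySem.List.pyRange 0 n 1).foldl
    (fun d k => d.insert (PySem.List.pyGetD arr k 0) k) PySem.Dict.empty
  (PySem.List.max? (first.keys.map (fun v => last.getD v 0 - first.getD v 0)) (fun y => y)).getD 0

-- ===== PRECONDITION & SPEC =====
-- Pre_ excludes exactly where Python A raises: n > len(arr) is an IndexError in the
-- loop, n ≤ 0 leaves distance empty so max() raises ValueError.
def Pre_maxDiffIndex (arr : List Int) (n : Int) : Prop := 0 < n ∧ n ≤ (arr.length : Int)
instance (arr : List Int) (n : Int) : Decidable (Pre_maxDiffIndex arr n) := by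
  unfold Pre_maxDiffIndex; infer_instance

def pvWitness_maxDiffIndex : List Int × Int := ([2, 1, 3, 4, 2, 1, 5, 1, 7], 9)

def Spec_maxDiffIndex (arr : List Int) (n : Int) (out : Int) : Prop := out = maxDiffIndex_alt arr n
instance (arr : List Int) (n : Int) (out : Int) : Decidable (Spec_maxDiffIndex arr n out) := by
  unfold Spec_maxDiffIndex; infer_instance

-- ===== CLAIM (what is proved, stated in full; the proofs are below) =====
def Claim_equal_maxDiffIndex : Prop := ∀ (arr : List Int) (n : Int), Dom_maxDiffIndex arr n → Pre_maxDiffIndex arr n → Spec_maxDiffIndex arr n (maxDiffIndex arr n)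

-- ===== LEMMAS AND PROOFS =====

-- Loop invariant relating A's pair of dicts to B's two index tables over the same
-- index list: A's number_data is B's first table, and A's distance items are
-- pointwise last[v] - first[v] over first's items.
theorem pv_inv (arr : List Int) (ks : List Int) (f0 l0 d2 : PySem.Dict Int Int)
    (hnd : f0.keys.Nodup)
    (hit : d2.items = f0.items.map (fun p => (p.1, l0.getD p.1 0 - p.2)))
    (hc : ∀ x : Int, l0.contains x = f0.contains x) :
    let F := ks.foldl (fun d k => d.setdefault (PySem.List.pyGetD arr k 0) k) f0
    let L := ks.foldl (fun d k => d.insert (PySem.List.pyGetD arr k 0) k) l0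
    let st := ks.foldl (pvStepA arr) (f0, d2)
    st.1 = F ∧ st.2.items = F.items.map (fun p => (p.1, L.getD p.1 0 - p.2)) ∧
      F.keys.Nodup ∧ (∀ x : Int, L.contains x = F.contains x) := by
  induction ks generalizing f0 l0 d2 with
  | nil => exact ⟨rfl, hit, hnd, hc⟩
  | cons k ks ih =>
    simp only [List.foldl_cons]
    have hkeys : d2.keys = f0.keys := by
      simp only [PySem.Dict.keys, hit, List.map_map]
      rfl
    have hd2c : ∀ y : Int, d2.contains y = f0.contains y := by
      intro y
      rw [PySem.Dict.contains_eq_decide_mem_keys, PySem.Dict.contains_eq_decide_mem_keys, hkeys]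
    by_cases hcon : f0.contains (PySem.List.pyGetD arr k 0) = true
    · have hstep : pvStepA arr (f0, d2) k
          = (f0, d2.insert (PySem.List.pyGetD arr k 0)
              (k - f0.getD (PySem.List.pyGetD arr k 0) 0)) := by
        simp [pvStepA, hcon]
      rw [hstep, PySem.Dict.setdefault_of_contains f0 k hcon]
      apply ih f0 _ _ hnd
      · rw [PySem.Dict.items_insert_of_contains _ _ (by rw [hd2c]; exact hcon), hit, List.map_map]
        apply List.map_congr_left
        rintro ⟨pa, pb⟩ hp
        by_cases hpx : pa = PySem.List.pyGetD arr k 0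
        · subst hpx
          have hval : f0.getD (PySem.List.pyGetD arr k 0) 0 = pb :=
            PySem.Dict.getD_of_mem_items f0 hp hnd 0
          simp [hval, PySem.Dict.getD_insert_self]
        · simp only [Function.comp_apply, beq_iff_eq, hpx, if_false]
          rw [PySem.Dict.getD_insert_of_ne _ _ _ hpx]
      · intro y
        rw [PySem.Dict.contains_insert, hc y]
        by_cases hyx : y = PySem.List.pyGetD arr k 0
        · simp [hyx, hcon]
        · simp [hyx]
    · have hcf : f0.contains (PySem.List.pyGetD arr k 0) = false := by
        simpa using hcon
      have hnotmem : (PySem.List.pyGetD arr k 0) ∉ f0.keys := by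
        rw [← PySem.Dict.contains_iff_mem_keys]
        simp [hcf]
      have hstep : pvStepA arr (f0, d2) k
          = (f0.insert (PySem.List.pyGetD arr k 0) k,
             d2.insert (PySem.List.pyGetD arr k 0) 0) := by
        simp [pvStepA, hcf]
      rw [hstep, PySem.Dict.setdefault_of_not_contains f0 k hcf]
      apply ih
      · exact PySem.Dict.nodup_keys_insert _ _ _ hnd
      · rw [PySem.Dict.items_insert_of_not_contains _ _ (by rw [hd2c]; exact hcf), hit,
            PySem.Dict.items_insert_of_not_contains _ _ hcf, List.map_append]
        congr 1
        · apply List.map_congr_left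
          rintro ⟨pa, pb⟩ hp
          have hpx : pa ≠ PySem.List.pyGetD arr k 0 := fun h =>
            hnotmem (h ▸ PySem.Dict.mem_keys_of_mem_items _ hp)
          rw [PySem.Dict.getD_insert_of_ne _ _ _ hpx]
        · simp [PySem.Dict.getD_insert_self]
      · intro y
        rw [PySem.Dict.contains_insert, PySem.Dict.contains_insert, hc y]

-- ===== VERDICT (by name: the statement is the Claim_ definition above) =====
theorem maxDiffIndex_spec : Claim_equal_maxDiffIndex := by
  intro arr n _ _
  show maxDiffIndex arr n = maxDiffIndex_alt arr n
  obtain ⟨h1, h2, h3, h4⟩ :=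
    pv_inv arr (PySem.List.pyRange 0 n 1) PySem.Dict.empty PySem.Dict.empty PySem.Dict.empty
      PySem.Dict.nodup_keys_empty (by rfl) (fun x => rfl)
  have hvals :
      ((PySem.List.pyRange 0 n 1).foldl (pvStepA arr)
          (PySem.Dict.empty, PySem.Dict.empty)).2.values
        = ((PySem.List.pyRange 0 n 1).foldl
              (fun d k => d.setdefault (PySem.List.pyGetD arr k 0) k) PySem.Dict.empty).keys.map
            (fun v =>
              ((PySem.List.pyRange 0 n 1).foldl
                  (fun d k => d.insert (PySem.List.pyGetD arr k 0) k) PySem.Dict.empty).getD v 0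
              - ((PySem.List.pyRange 0 n 1).foldl
                  (fun d k => d.setdefault (PySem.List.pyGetD arr k 0) k) PySem.Dict.empty).getD v 0) := by
    simp only [PySem.Dict.values, PySem.Dict.keys, h2, List.map_map]
    apply List.map_congr_left
    rintro ⟨pa, pb⟩ hp
    have hgd := PySem.Dict.getD_of_mem_items _ hp h3 0
    simp [hgd]
  simp only [maxDiffIndex, maxDiffIndex_alt, hvals]
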